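-- pv_equiv track=rewrite | github.com/Mykh-Ai/aitrader | backtester/validation.py | _combine_final_status
-- ===== SOURCE A (Python) =====
-- VALID_STATUSES = ("PASS", "REVIEW", "FAIL", "NOT_EVALUATED")
--
-- MAX_PASS_NOT_EVALUATED_CRITICAL = 1
--
-- class ValidationContractError(ValueError):
--     """Raised when validation input/output contract checks fail."""
--
-- def _require_status(value: str) -> None:
--     if value not in VALID_STATUSES:
--         raise ValidationContractError(f"Invalid status value: {value}")
--
-- def _combine_final_status(sub_statuses: list[str], critical_sub_statuses: list[str]) -> str:
--     for status in sub_statuses: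
--         _require_status(status)
--     for status in critical_sub_statuses:
--         _require_status(status)
--
--     if any(status == "FAIL" for status in sub_statuses):
--         return "FAIL"
--     if any(status == "REVIEW" for status in sub_statuses):
--         return "REVIEW"
--     critical_not_evaluated_count = sum(status == "NOT_EVALUATED" for status in critical_sub_statuses)
--     if critical_not_evaluated_count > MAX_PASS_NOT_EVALUATED_CRITICAL:
--         return "REVIEW"
--     return "PASS"
-- ===== SOURCE B (Python) =====
-- VALID_STATUSES = ("PASS", "REVIEW", "FAIL", "NOT_EVALUATED")
--
-- MAX_PASS_NOT_EVALUATED_CRITICAL = 1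
--
-- class ValidationContractError(ValueError):
--     """Raised when validation input/output contract checks fail."""
--
-- _SEVERITY = {"PASS": 0, "NOT_EVALUATED": 0, "REVIEW": 1, "FAIL": 2}
--
-- def _combine_final_status(sub_statuses: list[str], critical_sub_statuses: list[str]) -> str:
--     # Validate by set difference instead of per-element branch chains.
--     bad = set(sub_statuses + critical_sub_statuses) - set(VALID_STATUSES)
--     if bad:
--         raise ValidationContractError(f"Invalid status value: {sorted(bad)[0]}")
--     # Arithmetic severity lattice instead of an early-return chain:
--     # the final status is the maximum severity seen, bumped to REVIEW by the
--     # critical NOT_EVALUATED threshold only when nothing outranks PASS.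
--     level = max((_SEVERITY[s] for s in sub_statuses), default=0)
--     if level == 0 and critical_sub_statuses.count("NOT_EVALUATED") > MAX_PASS_NOT_EVALUATED_CRITICAL:
--         level = 1
--     return ("PASS", "REVIEW", "FAIL")[level]
-- ===== Notes on version B (the rewrite author's own statement) =====
-- stated objective: alternative
-- what changed: A validates element-by-element and decides via an early-return chain of any/sum scans; B validates once by set difference against the valid-status set and decides arithmetically: it maps each status to a numeric severity, takes the maximum (bumped by the critical NOT_EVALUATED count threshold), and indexes a severity->status table.
import Mathlib
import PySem

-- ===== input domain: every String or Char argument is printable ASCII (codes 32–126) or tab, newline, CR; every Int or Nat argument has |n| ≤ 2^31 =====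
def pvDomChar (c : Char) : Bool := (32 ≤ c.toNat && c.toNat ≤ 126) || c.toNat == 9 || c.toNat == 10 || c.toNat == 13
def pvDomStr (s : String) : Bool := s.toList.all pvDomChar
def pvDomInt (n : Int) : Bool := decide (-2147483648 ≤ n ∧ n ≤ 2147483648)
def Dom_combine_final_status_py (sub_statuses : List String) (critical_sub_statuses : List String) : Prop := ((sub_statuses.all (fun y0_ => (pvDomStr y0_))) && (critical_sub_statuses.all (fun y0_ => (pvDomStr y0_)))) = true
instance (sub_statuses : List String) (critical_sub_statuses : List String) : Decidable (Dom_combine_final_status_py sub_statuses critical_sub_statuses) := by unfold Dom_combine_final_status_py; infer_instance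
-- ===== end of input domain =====

-- B replaces A's early-return chain of any/sum scans by set-difference validation plus an
-- arithmetic severity maximum indexed into a table (alternative decomposition, same cost).
-- Both Pythons raise ValidationContractError exactly when some element is not a valid status;
-- Pre_ excludes precisely those inputs.

-- ===== PORT A =====
def pvIsValidStatus (s : String) : Bool :=
  s == "PASS" || s == "REVIEW" || s == "FAIL" || s == "NOT_EVALUATED"

-- A: validate every element of both lists (a raise = empty-string sentinel, outside Pre_),
-- then separate `any` scans and a `sum` scan, in A's branch order.
def combine_final_status_py (sub_statuses : List String) (critical_sub_statuses : List String) : String :=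
  if sub_statuses.any (fun s => !pvIsValidStatus s) then ""      -- ValidationContractError (outside Pre_)
  else if critical_sub_statuses.any (fun s => !pvIsValidStatus s) then ""   -- ValidationContractError (outside Pre_)
  else if sub_statuses.any (fun s => s == "FAIL") then "FAIL"
  else if sub_statuses.any (fun s => s == "REVIEW") then "REVIEW"
  else if (critical_sub_statuses.foldl (fun acc s => acc + (if s == "NOT_EVALUATED" then (1:Int) else 0)) 0) > 1 then "REVIEW"
  else "PASS"

-- ===== PORT B =====
-- B's severity dict _SEVERITY; `_SEVERITY[s]` is only reached on validated s, so every key is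
-- present and the `.getD 0` default is unreachable (Python would raise KeyError there).
def pvSeverity : PySem.Dict String Int :=
  PySem.Dict.ofList [("PASS", 0), ("NOT_EVALUATED", 0), ("REVIEW", 1), ("FAIL", 2)]

def combine_final_status_py_alt (sub_statuses : List String) (critical_sub_statuses : List String) : String :=
  -- bad = set(sub_statuses + critical_sub_statuses) - set(VALID_STATUSES)
  let bad := PySem.Set.diff (PySem.Set.ofList (sub_statuses ++ critical_sub_statuses))
      ["PASS", "REVIEW", "FAIL", "NOT_EVALUATED"]
  if bad ≠ [] then ""    -- ValidationContractError (outside Pre_)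
  else
    -- level = max((_SEVERITY[s] for s in sub_statuses), default=0)
    let level0 := (PySem.List.max? (sub_statuses.map (fun s => (PySem.Dict.get? pvSeverity s).getD 0)) (fun x => x)).getD 0
    let level := if level0 = 0 ∧ PySem.List.count critical_sub_statuses "NOT_EVALUATED" > 1 then (1:Int) else level0
    -- ("PASS", "REVIEW", "FAIL")[level] ; level ∈ {0,1,2} so the index never raises
    (PySem.List.pyGet? ["PASS", "REVIEW", "FAIL"] level).getD ""

-- ===== PRECONDITION & SPEC =====
-- Pre_ excludes exactly the inputs on which both Pythons raise ValidationContractError: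
-- some element outside the four valid status strings.
def Pre_combine_final_status_py (sub_statuses : List String) (critical_sub_statuses : List String) : Prop :=
  (sub_statuses.all pvIsValidStatus && critical_sub_statuses.all pvIsValidStatus) = true
instance (sub_statuses : List String) (critical_sub_statuses : List String) : Decidable (Pre_combine_final_status_py sub_statuses critical_sub_statuses) := by unfold Pre_combine_final_status_py; infer_instance

def pvWitness_combine_final_status_py : List String × List String :=
  (["PASS", "REVIEW"], ["NOT_EVALUATED", "PASS"])

def Spec_combine_final_status_py (sub_statuses : List String) (critical_sub_statuses : List String) (out : String) : Prop := out = combine_final_status_py_alt sub_statuses critical_sub_statuses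
instance (sub_statuses : List String) (critical_sub_statuses : List String) (out : String) : Decidable (Spec_combine_final_status_py sub_statuses critical_sub_statuses out) := by unfold Spec_combine_final_status_py; infer_instance

-- ===== CLAIM =====
def Claim_equal_combine_final_status_py : Prop := ∀ (sub_statuses : List String) (critical_sub_statuses : List String), Dom_combine_final_status_py sub_statuses critical_sub_statuses → Pre_combine_final_status_py sub_statuses critical_sub_statuses → Spec_combine_final_status_py sub_statuses critical_sub_statuses (combine_final_status_py sub_statuses critical_sub_statuses)

-- ===== LEMMAS AND PROOFS =====
-- The value A's branch chain encodes, as a number: 2 = FAIL, 1 = REVIEW, 0 = PASS.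
def pvChain (l : List String) : Int :=
  if l.any (fun s => s == "FAIL") then 2
  else if l.any (fun s => s == "REVIEW") then 1 else 0

def pvSev (s : String) : Int := (PySem.Dict.get? pvSeverity s).getD 0

theorem pvChain_bounds (l : List String) : 0 ≤ pvChain l ∧ pvChain l ≤ 2 := by
  unfold pvChain; split_ifs <;> omega

theorem pvSev_nonneg (s : String) : 0 ≤ pvSev s := by
  unfold pvSev
  rw [show pvSeverity = PySem.Dict.mk [("PASS", 0), ("NOT_EVALUATED", 0), ("REVIEW", 1), ("FAIL", 2)] from by decide]
  simp only [PySem.Dict.get?_mk_cons]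
  split_ifs <;> simp [PySem.Dict.get?]

theorem pvChain_cons (x : String) (rest : List String) (h : pvIsValidStatus x = true) :
    max (pvSev x) (pvChain rest) = pvChain (x :: rest) := by
  have hb := pvChain_bounds rest
  unfold pvIsValidStatus at h
  simp only [Bool.or_eq_true, beq_iff_eq] at h
  rcases h with ((rfl | rfl) | rfl) | rfl <;>
    simp only [show pvSev "PASS" = (0:Int) from by decide, show pvSev "REVIEW" = (1:Int) from by decide,
      show pvSev "FAIL" = (2:Int) from by decide, show pvSev "NOT_EVALUATED" = (0:Int) from by decide,
      pvChain, List.any_cons] <;>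
    simp <;> split_ifs <;> omega

theorem pvSev_foldl (l : List String) (h : l.all pvIsValidStatus = true) :
    ∀ a : Int, 0 ≤ a → (l.map pvSev).foldl max a = max a (pvChain l) := by
  induction l with
  | nil => intro a ha; simp [pvChain]; omega
  | cons x rest ih =>
    intro a ha
    simp only [List.all_cons, Bool.and_eq_true] at h
    simp only [List.map_cons, List.foldl_cons]
    rw [ih h.2 _ (le_trans ha (le_max_left _ _)), max_assoc, pvChain_cons x rest h.1]

theorem pvSum_eq_count (l : List String) :
    ∀ a : Int, l.foldl (fun acc s => acc + (if s == "NOT_EVALUATED" then (1:Int) else 0)) a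
      = a + PySem.List.count l "NOT_EVALUATED" := by
  induction l with
  | nil => intro a; simp [PySem.List.count]
  | cons s rest ih =>
    intro a
    simp only [List.foldl_cons, ih, PySem.List.count, List.count_cons]
    by_cases hs : s = "NOT_EVALUATED" <;> simp [hs] <;> ring

theorem pvBad_nil (subs crits : List String)
    (h : (subs.all pvIsValidStatus && crits.all pvIsValidStatus) = true) :
    PySem.Set.diff (PySem.Set.ofList (subs ++ crits))
      ["PASS", "REVIEW", "FAIL", "NOT_EVALUATED"] = [] := by
  simp only [Bool.and_eq_true, List.all_eq_true] at h
  unfold PySem.Set.diff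
  rw [List.filter_eq_nil_iff]
  intro x hx
  have hx' : x ∈ subs ++ crits := (PySem.Set.mem_ofList _ _).mp hx
  have hv : pvIsValidStatus x = true := by
    rcases List.mem_append.mp hx' with h1 | h1
    · exact h.1 x h1
    · exact h.2 x h1
  unfold pvIsValidStatus at hv
  simp only [Bool.or_eq_true, beq_iff_eq] at hv
  simp only [Bool.not_eq_true']
  rcases hv with ((rfl | rfl) | rfl) | rfl <;> decide

theorem pvMax_eq_chain (subs : List String) (h : subs.all pvIsValidStatus = true) :
    (PySem.List.max? (subs.map pvSev) (fun x => x)).getD 0 = pvChain subs := by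
  cases subs with
  | nil => simp [PySem.List.max?, pvChain]
  | cons x rest =>
    simp only [List.all_cons, Bool.and_eq_true] at h
    simp only [List.map_cons, PySem.List.max?_id_cons, Option.getD_some]
    rw [pvSev_foldl rest h.2 _ (pvSev_nonneg x), pvChain_cons x rest h.1]

-- ===== VERDICT =====
theorem combine_final_status_py_spec : Claim_equal_combine_final_status_py := by
  intro subs crits _ hpre
  unfold Pre_combine_final_status_py at hpre
  have hpre' := hpre
  simp only [Bool.and_eq_true] at hpre'
  unfold Spec_combine_final_status_py combine_final_status_py combine_final_status_py_alt
  have h1 : subs.any (fun s => !pvIsValidStatus s) = false := by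
    simp only [List.all_eq_true] at hpre'
    simp only [List.any_eq_false]; intro s hs; simp [hpre'.1 s hs]
  have h2 : crits.any (fun s => !pvIsValidStatus s) = false := by
    simp only [List.all_eq_true] at hpre'
    simp only [List.any_eq_false]; intro s hs; simp [hpre'.2 s hs]
  rw [pvBad_nil subs crits hpre]
  have hmax : (PySem.List.max? (subs.map (fun s => (PySem.Dict.get? pvSeverity s).getD 0)) (fun x => x)).getD 0 = pvChain subs :=
    pvMax_eq_chain subs hpre'.1
  simp only [h1, h2, Bool.false_eq_true, ne_eq, not_true_eq_false, if_neg,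
    not_false_eq_true, pvSum_eq_count, hmax]
  have hb := pvChain_bounds subs
  unfold pvChain at *
  split_ifs with hf hr hc hc' <;>
    simp_all [PySem.List.pyGet?, PySem.List.pyIdx?] <;> omega
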